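-- pv_equiv track=rewrite | github.com/LeeGukHeon/Autobot | autobot/data/collect/plan_ticks.py | _normalize_days_ago
-- ===== SOURCE A (Python) =====
-- DEFAULT_DAYS_AGO: tuple[int, ...] = (1, 2, 3, 4, 5, 6, 7)
--
-- def _normalize_days_ago(values: tuple[int, ...] | None) -> tuple[int, ...]:
--     deduped: list[int] = []
--     seen: set[int] = set()
--     for raw in values or DEFAULT_DAYS_AGO:
--         day = int(raw)
--         if day < 1 or day > 7:
--             raise ValueError("days_ago values must be between 1 and 7")
--         if day in seen:
--             continue
--         seen.add(day)
--         deduped.append(day)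
--     if not deduped:
--         return DEFAULT_DAYS_AGO
--     return tuple(sorted(deduped))
-- ===== SOURCE B (Python) =====
-- DEFAULT_DAYS_AGO: tuple = (1, 2, 3, 4, 5, 6, 7)
--
--
-- def _normalize_days_ago(values):
--     # Presence table over the fixed day range 1..7: one pass marks buckets,
--     # one bucket scan emits the sorted distinct days (no sort, no seen-set).
--     present = [False] * 8
--     for raw in values or DEFAULT_DAYS_AGO:
--         day = int(raw)
--         if day < 1 or day > 7:
--             raise ValueError("days_ago values must be between 1 and 7")
--         present[day] = True
--     result = tuple(d for d in range(1, 8) if present[d])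
--     return result if result else DEFAULT_DAYS_AGO
-- ===== Notes on version B (the rewrite author's own statement) =====
-- stated objective: alternative
-- what changed: Replaces the seen-set + deduped-list + comparison sort with a fixed-size presence table over the day range 1..7: one marking pass, then a bucket scan of range(1,8) emits the distinct days already in sorted order.
import Mathlib
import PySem

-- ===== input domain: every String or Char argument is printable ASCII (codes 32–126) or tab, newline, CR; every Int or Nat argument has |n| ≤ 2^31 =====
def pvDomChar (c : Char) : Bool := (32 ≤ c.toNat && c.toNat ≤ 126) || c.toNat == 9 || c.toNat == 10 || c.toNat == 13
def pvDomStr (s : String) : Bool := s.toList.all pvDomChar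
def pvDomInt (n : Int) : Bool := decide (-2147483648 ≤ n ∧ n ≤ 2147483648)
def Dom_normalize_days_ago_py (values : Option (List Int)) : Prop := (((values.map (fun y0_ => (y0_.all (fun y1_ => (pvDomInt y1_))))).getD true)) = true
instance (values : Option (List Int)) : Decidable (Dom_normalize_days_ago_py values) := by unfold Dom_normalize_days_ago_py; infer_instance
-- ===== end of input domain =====

-- B replaces A's seen-set + deduped-list + sort with a fixed presence table over 1..7
-- (mark pass, then bucket scan of range(1,8) yields the sorted distinct days).

-- module constant DEFAULT_DAYS_AGO (one copy per port, so the ports share no definitions)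
def pvDEFAULT : List Int := [1, 2, 3, 4, 5, 6, 7]

-- ===== PORT A =====
-- the for-loop of A: builds deduped/seen; none = the ValueError branch
def pvALoop : List Int → List Int → PySem.Set Int → Option (List Int)
  | [], deduped, _ => some deduped
  | raw :: rest, deduped, seen =>
    let day := raw
    if day < 1 ∨ 7 < day then none
    else if day ∈ seen then pvALoop rest deduped seen
    else pvALoop rest (deduped ++ [day]) (PySem.Set.add seen day)

def normalize_days_ago_py (values : Option (List Int)) : List Int :=
  let src := match values with
    | none => pvDEFAULT
    | some [] => pvDEFAULT
    | some vs => vs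
  match pvALoop src [] PySem.Set.empty with
  | none => []   -- ValueError: excluded by Pre_
  | some deduped =>
    if deduped = [] then pvDEFAULT
    else PySem.List.sorted deduped (fun x => x) false

-- ===== PORT B =====
-- the for-loop of B: marks present[day] = True; none = the ValueError branch
def pvBLoop : List Int → List Bool → Option (List Bool)
  | [], present => some present
  | raw :: rest, present =>
    let day := raw
    if day < 1 ∨ 7 < day then none
    else pvBLoop rest (PySem.List.pySetD present day true)

def pvDEFAULT_B : List Int := [1, 2, 3, 4, 5, 6, 7]

def normalize_days_ago_py_alt (values : Option (List Int)) : List Int :=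
  let src := match values with
    | some (v :: vs) => v :: vs
    | _ => pvDEFAULT_B
  match pvBLoop src (List.replicate 8 false) with
  | none => []   -- ValueError: excluded by Pre_
  | some present =>
    let result := (PySem.List.pyRange 1 8 1).filter (fun d => PySem.List.pyGetD present d false)
    if result = [] then pvDEFAULT_B else result

-- ===== PRECONDITION & SPEC =====
-- Pre_ excludes exactly the inputs on which A raises ValueError: a provided list
-- containing a value outside 1..7 (B raises there too).
def Pre_normalize_days_ago_py (values : Option (List Int)) : Prop :=
  ∀ v ∈ values.getD [], 1 ≤ v ∧ v ≤ 7
instance (values : Option (List Int)) : Decidable (Pre_normalize_days_ago_py values) := by unfold Pre_normalize_days_ago_py; infer_instance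

def pvWitness_normalize_days_ago_py : Option (List Int) := some [3, 1, 3, 7]

def Spec_normalize_days_ago_py (values : Option (List Int)) (out : List Int) : Prop := out = normalize_days_ago_py_alt values
instance (values : Option (List Int)) (out : List Int) : Decidable (Spec_normalize_days_ago_py values out) := by unfold Spec_normalize_days_ago_py; infer_instance

-- ===== CLAIM (what is proved, stated in full; the proofs are below) =====
def Claim_equal_normalize_days_ago_py : Prop := ∀ (values : Option (List Int)), Dom_normalize_days_ago_py values → Pre_normalize_days_ago_py values → Spec_normalize_days_ago_py values (normalize_days_ago_py values)

-- ===== LEMMAS AND PROOFS =====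

-- A's loop: on all-valid input it returns a nodup list with the same members as deduped ++ rest
lemma pvALoop_spec (rest : List Int) :
    ∀ deduped seen, (∀ v ∈ rest, 1 ≤ v ∧ v ≤ 7) →
    deduped.Nodup → (∀ d : Int, d ∈ seen ↔ d ∈ deduped) →
    ∃ out, pvALoop rest deduped seen = some out ∧ out.Nodup ∧
      (∀ d : Int, d ∈ out ↔ d ∈ deduped ∨ d ∈ rest) := by
  induction rest with
  | nil => intro deduped seen _ hnd _; exact ⟨deduped, rfl, hnd, fun d => by simp⟩
  | cons raw rest ih =>
    intro deduped seen hval hnd hseen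
    have hr := hval raw (by simp)
    have hnot : ¬ (raw < 1 ∨ 7 < raw) := by omega
    by_cases hmem : raw ∈ seen
    · obtain ⟨out, h1, h2, h3⟩ := ih deduped seen (fun v hv => hval v (by simp [hv])) hnd hseen
      refine ⟨out, ?_, h2, ?_⟩
      · show pvALoop (raw :: rest) deduped seen = some out
        simp only [pvALoop]
        rw [if_neg hnot, if_pos hmem]
        exact h1
      · intro d
        rw [h3]
        constructor
        · rintro (h | h) <;> simp [h]
        · rintro (h | h)
          · exact Or.inl h
          · rcases List.mem_cons.mp h with h | h
            · subst h; exact Or.inl ((hseen d).mp hmem)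
            · exact Or.inr h
    · obtain ⟨out, h1, h2, h3⟩ := ih (deduped ++ [raw]) (PySem.Set.add seen raw)
        (fun v hv => hval v (by simp [hv]))
        (by
          refine List.Nodup.append hnd (by simp) ?_
          intro a ha hb
          simp only [List.mem_singleton] at hb
          cases hb
          exact hmem ((hseen _).mpr ha))
        (by
          intro d
          rw [PySem.Set.mem_add]
          simp [hseen d, or_comm])
      refine ⟨out, ?_, h2, ?_⟩
      · show pvALoop (raw :: rest) deduped seen = some out
        simp only [pvALoop]
        rw [if_neg hnot, if_neg hmem]
        exact h1
      · intro d
        rw [h3]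
        simp
        tauto

-- B's loop: on all-valid input it returns a length-8 table marking old marks plus rest's members
lemma pvBLoop_spec (rest : List Int) :
    ∀ present : List Bool, present.length = 8 → (∀ v ∈ rest, 1 ≤ v ∧ v ≤ 7) →
    ∃ p, pvBLoop rest present = some p ∧ p.length = 8 ∧
      (∀ d : Int, 1 ≤ d → d ≤ 7 →
        (PySem.List.pyGetD p d false = (PySem.List.pyGetD present d false || decide (d ∈ rest)))) := by
  induction rest with
  | nil => intro present hlen _; exact ⟨present, rfl, hlen, fun d _ _ => by simp⟩
  | cons raw rest ih =>
    intro present hlen hval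
    have hr := hval raw (by simp)
    have hnot : ¬ (raw < 1 ∨ 7 < raw) := by omega
    obtain ⟨p, h1, h2, h3⟩ := ih (PySem.List.pySetD present raw true)
      (by rw [PySem.List.length_pySetD]; exact hlen)
      (fun v hv => hval v (by simp [hv]))
    refine ⟨p, ?_, h2, ?_⟩
    · show pvBLoop (raw :: rest) present = some p
      simp only [pvBLoop]
      rw [if_neg hnot]
      exact h1
    · intro d hd1 hd7
      rw [h3 d hd1 hd7]
      obtain ⟨m, hm⟩ : ∃ m : Nat, (m : Int) = raw := ⟨raw.toNat, by omega⟩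
      obtain ⟨k, hk⟩ : ∃ k : Nat, (k : Int) = d := ⟨d.toNat, by omega⟩
      rw [← hm, ← hk, PySem.List.pyGetD_pySetD_natCast present m k true false (by rw [hlen]; omega)]
      by_cases hkm : k = m
      · have hdr : d = raw := by omega
        simp [hkm]
      · have hdr : ¬ (d = (m : Int)) := by omega
        simp [hkm, List.mem_cons]

-- strictly increasing filter of the bucket range
lemma pvFilter_pairwise (p : Int → Bool) :
    ((PySem.List.pyRange 1 8 1).filter p).Pairwise (· < ·) :=
  List.Pairwise.filter p (PySem.List.pairwise_lt_pyRange_one 1 8)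

-- core agreement on a nonempty all-valid source list
lemma pvSrc_agree (src : List Int) (hne : src ≠ [])
    (hval : ∀ v ∈ src, 1 ≤ v ∧ v ≤ 7) :
    (match pvALoop src [] PySem.Set.empty with
      | none => ([] : List Int)
      | some deduped => if deduped = [] then pvDEFAULT
          else PySem.List.sorted deduped (fun x => x) false) =
    (match pvBLoop src (List.replicate 8 false) with
      | none => ([] : List Int)
      | some present =>
        let result := (PySem.List.pyRange 1 8 1).filter (fun d => PySem.List.pyGetD present d false)
        if result = [] then pvDEFAULT_B else result) := by
  obtain ⟨out, ha, hnd, hmem⟩ := pvALoop_spec src [] PySem.Set.empty hval List.nodup_nil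
    (by intro d; simp [PySem.Set.empty])
  obtain ⟨p, hb, hplen, hpget⟩ := pvBLoop_spec src (List.replicate 8 false) (by simp) hval
  rw [ha, hb]
  show (if out = [] then pvDEFAULT else PySem.List.sorted out (fun x => x)) =
    (if ((PySem.List.pyRange 1 8).filter (fun d => PySem.List.pyGetD p d false)) = []
      then pvDEFAULT_B
      else (PySem.List.pyRange 1 8).filter (fun d => PySem.List.pyGetD p d false))
  -- the B result is the filter by membership in src
  have hfil : (PySem.List.pyRange 1 8 1).filter (fun d => PySem.List.pyGetD p d false)
      = (PySem.List.pyRange 1 8 1).filter (fun d => decide (d ∈ src)) := by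
    apply List.filter_congr
    intro d hd
    have hd' := (PySem.List.mem_pyRange_one).mp hd
    rw [hpget d (by omega) (by omega)]
    have hrep : PySem.List.pyGetD (List.replicate 8 false) d false = false := by
      rw [PySem.List.pyGetD_eq_getElem _ _ (by omega) (by simp; omega)]
      simp only [List.getElem_replicate]
    rw [hrep]
    simp
  rw [hfil]
  -- both sides nonempty
  obtain ⟨x, hx⟩ := List.exists_mem_of_ne_nil src hne
  have hxout : x ∈ out := (hmem x).mpr (Or.inr hx)
  have hxfil : x ∈ (PySem.List.pyRange 1 8 1).filter (fun d => decide (d ∈ src)) := by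
    have := hval x hx
    exact List.mem_filter.mpr ⟨(PySem.List.mem_pyRange_one).mpr (by omega), by simpa using hx⟩
  have houtne : out ≠ [] := fun h => by simp [h] at hxout
  have hfilne : (PySem.List.pyRange 1 8 1).filter (fun d => decide (d ∈ src)) ≠ [] :=
    fun h => by simp [h] at hxfil
  rw [if_neg houtne, if_neg hfilne]
  -- sorted out = the filter, by perm + strict sortedness
  apply PySem.List.sorted_eq_of_perm_of_pairwise_lt
  · rw [List.perm_ext_iff_of_nodup (List.Nodup.filter _ (PySem.List.nodup_pyRange_one 1 8)) hnd]
    intro a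
    rw [List.mem_filter, hmem, PySem.List.mem_pyRange_one]
    constructor
    · rintro ⟨_, h⟩; exact Or.inr (by simpa using h)
    · rintro (h | h)
      · simp at h
      · have := hval a h
        exact ⟨by omega, by simpa using h⟩
  · exact pvFilter_pairwise _

-- ===== VERDICT (by name: the statement is the Claim_ definition above) =====
theorem normalize_days_ago_py_spec : Claim_equal_normalize_days_ago_py := by
  intro values _ hpre
  unfold Spec_normalize_days_ago_py
  match values with
  | none => decide
  | some [] => decide
  | some (v :: vs) =>
    have hval : ∀ x ∈ (v :: vs), 1 ≤ x ∧ x ≤ 7 := by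
      intro x hx; exact hpre x (by simpa using hx)
    exact pvSrc_agree (v :: vs) (by simp) hval
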